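-- pv_equiv track=rewrite | github.com/Dipita-Tasnim/Algorithms | Lab_4/Task6/Lab4_Task6.py | max_diamonds
-- ===== SOURCE A (Python) =====
-- def flood_fill(grid, visited, row, col):
--     if row < 0 or row >= len(grid) or col < 0 or col >= len(grid[0]) or grid[row][col] == '#' or visited[row][col]:
--         return 0
--
--     visited[row][col] = True
--     collected_D = 0   #per iteration e 0 hoy but ma_D update hote thake. max_D initially 0 thake.
--
--     if grid[row][col] == 'D':
--         collected_D = 1
--
--     collected_D += flood_fill(grid, visited, row + 1, col)
--     collected_D += flood_fill(grid, visited, row - 1, col)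
--     collected_D += flood_fill(grid, visited, row, col + 1)
--     collected_D += flood_fill(grid, visited, row, col - 1)
--
--     return collected_D   #for per starting point(0,1)/or(0,2)...er l,r,up,down.
--
-- def max_diamonds(grid):
--     rows, cols = len(grid), len(grid[0])
--     visited = [[False] * cols for _ in range(rows)]
--     max_D = 0
--
--     for i in range(rows):
--         for j in range(cols):
--             if grid[i][j] == '.' and not visited[i][j]:
--                 collected_D = flood_fill(grid, visited, i, j)
--                 max_D = max(max_D, collected_D)
--
--     return max_D
-- ===== SOURCE B (Python) =====
-- def max_diamonds(grid):
--     rows, cols = len(grid), len(grid[0])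
--     seen = set()
--     best = 0
--     for i in range(rows):
--         for j in range(cols):
--             if grid[i][j] != '.' or (i, j) in seen:
--                 continue
--             count = 0
--             todo = [(i, j)]
--             while todo:
--                 r, c = todo.pop()
--                 if not (0 <= r < rows and 0 <= c < cols) or grid[r][c] == '#' or (r, c) in seen:
--                     continue
--                 seen.add((r, c))
--                 if grid[r][c] == 'D':
--                     count += 1
--                 todo += [(r, c - 1), (r, c + 1), (r - 1, c), (r + 1, c)]
--             best = max(best, count)
--     return best
-- ===== Notes on version B (the rewrite author's own statement) =====
-- stated objective: alternative
-- what changed: The recursive flood_fill helper over a preallocated boolean visited matrix is replaced by an iterative explicit-stack traversal inside max_diamonds that records visited cells in a hash set of (row,col) tuples, so there is no helper, no deep recursion and no 2D matrix.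
import Mathlib
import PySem

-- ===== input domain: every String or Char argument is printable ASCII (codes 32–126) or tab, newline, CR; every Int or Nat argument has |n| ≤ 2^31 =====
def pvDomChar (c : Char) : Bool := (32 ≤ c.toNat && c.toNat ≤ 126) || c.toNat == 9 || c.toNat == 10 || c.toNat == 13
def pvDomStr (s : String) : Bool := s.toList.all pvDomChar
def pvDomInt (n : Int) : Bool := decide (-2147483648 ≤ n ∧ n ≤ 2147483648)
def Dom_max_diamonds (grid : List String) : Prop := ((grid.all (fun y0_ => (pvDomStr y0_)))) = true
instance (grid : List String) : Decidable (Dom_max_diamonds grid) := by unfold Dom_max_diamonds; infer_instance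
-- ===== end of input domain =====

-- B replaces A's recursive flood_fill over a preallocated boolean visited matrix by an
-- iterative explicit-stack traversal that records visited cells in a set of (row, col)
-- pairs — no helper function, no recursion, no 2D matrix. Same asymptotic cost.
-- Both ports use fuel only to make the same computation total (it is always sufficient).

-- ===== PORT A =====
-- grid[r][c] (total accessor; under Pre_ every consulted index is in range)
def gch (grid : List String) (r c : Int) : Char :=
  ((grid.getD r.toNat "").toList.getD c.toNat ' ')

def vget (v : List (List Bool)) (r c : Int) : Bool :=
  (v.getD r.toNat []).getD c.toNat false

-- visited[row][col] = True
def setRow : List (List Bool) → Nat → Nat → List (List Bool)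
  | [], _, _ => []
  | row :: rest, 0, j => row.set j true :: rest
  | row :: rest, i+1, j => row :: setRow rest i j

def vset (v : List (List Bool)) (r c : Int) : List (List Bool) :=
  setRow v r.toNat c.toNat

-- the guard of flood_fill
def blocked (grid : List String) (v : List (List Bool)) (r c : Int) : Bool :=
  decide (r < 0) || decide ((grid.length : Int) ≤ r) || decide (c < 0) ||
    decide (((grid.headD "").length : Int) ≤ c) || (gch grid r c == '#') || vget v r c

-- flood_fill, with fuel making the recursion structural (rows*cols+1 always suffices)
def ff (grid : List String) : Nat → List (List Bool) → Int → Int → Int × List (List Bool)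
  | 0, v, _, _ => (0, v)
  | fuel+1, v, r, c =>
    if blocked grid v r c then (0, v)
    else
      let v1 := vset v r c
      let d0 : Int := if gch grid r c = 'D' then 1 else 0
      let p1 := ff grid fuel v1 (r+1) c
      let p2 := ff grid fuel p1.2 (r-1) c
      let p3 := ff grid fuel p2.2 r (c+1)
      let p4 := ff grid fuel p3.2 r (c-1)
      (d0 + p1.1 + p2.1 + p3.1 + p4.1, p4.2)

def max_diamonds (grid : List String) : Int :=
  let rows := grid.length
  let cols := (grid.headD "").length
  let v0 := List.replicate rows (List.replicate cols false)
  ((PySem.List.pyRange 0 (rows : Int) 1).foldl (fun (st : Int × List (List Bool)) i =>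
    (PySem.List.pyRange 0 (cols : Int) 1).foldl (fun st j =>
      if gch grid i j = '.' ∧ vget st.2 i j = false then
        let p := ff grid (rows * cols + 1) st.2 i j
        (max st.1 p.1, p.2)
      else st) st) ((0 : Int), v0)).1

-- ===== PORT B =====
-- grid[r][c] for B (evaluated only after the bounds check)
def cellB (grid : List String) (r c : Int) : Char :=
  ((grid.getD r.toNat "").toList.getD c.toNat ' ')

-- 'if not (0 <= r < rows and 0 <= c < cols) or grid[r][c] == '#' or (r, c) in seen'
def skipB (grid : List String) (S : List (Int × Int)) (r c : Int) : Bool :=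
  decide (¬ (0 ≤ r ∧ r < (grid.length : Int) ∧ 0 ≤ c ∧ c < ((grid.headD "").length : Int)))
    || (cellB grid r c == '#') || decide ((r, c) ∈ S)

-- the 'while todo' loop; head of the list is the top of the Python stack
-- (Python appends [left, right, up, down] and pops from the end)
def loopC (grid : List String) : Nat → List (Int × Int) → List (Int × Int) → Int → Int × List (Int × Int)
  | 0, S, _, cnt => (cnt, S)
  | _+1, S, [], cnt => (cnt, S)
  | fuel+1, S, (r, c) :: td, cnt =>
    if skipB grid S r c then loopC grid fuel S td cnt
    else
      loopC grid fuel (PySem.Set.add S (r, c))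
        ((r+1, c) :: (r-1, c) :: (r, c+1) :: (r, c-1) :: td)
        (if cellB grid r c = 'D' then cnt + 1 else cnt)

def max_diamonds_alt (grid : List String) : Int :=
  let rows := grid.length
  let cols := (grid.headD "").length
  ((PySem.List.pyRange 0 (rows : Int) 1).foldl (fun (st : Int × List (Int × Int)) i =>
    (PySem.List.pyRange 0 (cols : Int) 1).foldl (fun st j =>
      if cellB grid i j ≠ '.' ∨ (i, j) ∈ st.2 then st
      else
        let p := loopC grid (4 * rows * cols + 2) st.2 [(i, j)] 0
        (max st.1 p.1, p.2)) st) ((0 : Int), ([] : List (Int × Int)))).1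

-- ===== PRECONDITION & SPEC =====
-- A raises IndexError on the empty grid (grid[0]) and whenever some row is shorter than
-- row 0 (the double loop then evaluates grid[i][j] out of range); exactly those inputs
-- are excluded (B raises there too).
def Pre_max_diamonds (grid : List String) : Prop :=
  grid ≠ [] ∧ ∀ s ∈ grid, (grid.headD "").length ≤ s.length
instance (grid : List String) : Decidable (Pre_max_diamonds grid) := by
  unfold Pre_max_diamonds; infer_instance

def pvWitness_max_diamonds : List String := ["D.#", "..D", "#.D"]

def Spec_max_diamonds (grid : List String) (out : Int) : Prop := out = max_diamonds_alt grid
instance (grid : List String) (out : Int) : Decidable (Spec_max_diamonds grid out) := by unfold Spec_max_diamonds; infer_instance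

-- ===== CLAIM (what is proved, stated in full; the proofs are below) =====
def Claim_equal_max_diamonds : Prop := ∀ (grid : List String), Dom_max_diamonds grid → Pre_max_diamonds grid → Spec_max_diamonds grid (max_diamonds grid)

-- ===== LEMMAS AND PROOFS =====

-- number of unvisited cells of A's matrix (the termination/fuel measure)
def unv (v : List (List Bool)) : Nat := (v.map (fun row => row.count false)).sum

-- A's visited matrix keeps its rectangular shape
def Shape (grid : List String) (v : List (List Bool)) : Prop :=
  v.map List.length = List.replicate grid.length (grid.headD "").length

-- the abstraction relation: B's seen-set S holds exactly the in-range cells marked in v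
def RelVS (grid : List String) (v : List (List Bool)) (S : List (Int × Int)) : Prop :=
  Shape grid v ∧ ∀ r c : Int, 0 ≤ r → r < (grid.length : Int) → 0 ≤ c →
    c < ((grid.headD "").length : Int) → (vget v r c = true ↔ (r, c) ∈ S)

-- canonical-fuel wrappers used only in the proofs
def FF (grid : List String) (v : List (List Bool)) (r c : Int) : Int × List (List Bool) :=
  ff grid (unv v + 1) v r c

theorem cellB_eq_gch (grid : List String) (r c : Int) : cellB grid r c = gch grid r c := rfl

theorem setRow_map_length (v : List (List Bool)) (i j : Nat) :
    (setRow v i j).map List.length = v.map List.length := by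
  induction v generalizing i with
  | nil => rfl
  | cons row rest ih =>
    cases i with
    | zero => simp [setRow]
    | succ i => simp [setRow, ih]

theorem count_set_le (row : List Bool) (j : Nat) :
    (row.set j true).count false ≤ row.count false := by
  induction row generalizing j with
  | nil => simp
  | cons b t ih =>
    cases j with
    | zero => cases b <;> simp [List.count_cons]
    | succ j => cases b <;> simp [List.count_cons, ih j]

theorem count_set_eq (row : List Bool) (j : Nat) (hj : j < row.length)
    (hv : row.getD j false = false) :
    (row.set j true).count false + 1 = row.count false := by
  induction row generalizing j with
  | nil => simp at hj
  | cons b t ih =>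
    cases j with
    | zero =>
      simp only [List.getD, List.getElem?_cons_zero, Option.getD_some] at hv
      subst hv
      simp [List.count_cons]
    | succ j =>
      simp only [List.length_cons, Nat.succ_lt_succ_iff] at hj
      simp only [List.getD, List.getElem?_cons_succ] at hv
      have := ih j hj hv
      cases b <;> simp [List.count_cons] <;> omega

theorem unv_setRow_le (v : List (List Bool)) (i j : Nat) :
    unv (setRow v i j) ≤ unv v := by
  induction v generalizing i with
  | nil => simp [setRow]
  | cons row rest ih =>
    cases i with
    | zero => simp [setRow, unv]; exact count_set_le row j
    | succ i =>
      simp only [setRow, unv, List.map_cons, List.sum_cons]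
      have := ih i
      simp only [unv] at this
      omega

theorem unv_setRow_eq (v : List (List Bool)) (i j : Nat)
    (hi : i < v.length) (hj : j < (v.getD i []).length)
    (hv : (v.getD i []).getD j false = false) :
    unv (setRow v i j) + 1 = unv v := by
  induction v generalizing i with
  | nil => simp at hi
  | cons row rest ih =>
    cases i with
    | zero =>
      simp only [List.getD, List.getElem?_cons_zero, Option.getD_some] at hj hv
      simp only [setRow, unv, List.map_cons, List.sum_cons]
      have := count_set_eq row j hj hv
      omega
    | succ i =>
      simp only [List.length_cons, Nat.succ_lt_succ_iff] at hi
      simp only [List.getD, List.getElem?_cons_succ] at hj hv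
      simp only [setRow, unv, List.map_cons, List.sum_cons]
      have := ih i hi hj hv
      simp only [unv] at this
      omega

theorem unv_le_total (grid : List String) (v : List (List Bool)) (hS : Shape grid v) :
    unv v ≤ grid.length * (grid.headD "").length := by
  have h : ∀ w : List (List Bool), unv w ≤ (w.map List.length).sum := by
    intro w
    induction w with
    | nil => simp [unv]
    | cons row rest ih =>
      simp only [unv, List.map_cons, List.sum_cons] at *
      have : List.count false row ≤ row.length := List.count_le_length
      omega
  have := h v
  rw [Shape] at hS
  rw [hS] at this
  simpa [List.sum_replicate] using this

theorem shape_len (grid : List String) (v : List (List Bool)) (hS : Shape grid v) :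
    v.length = grid.length := by
  have := congrArg List.length hS
  simpa using this

theorem shape_row_len (grid : List String) (v : List (List Bool)) (hS : Shape grid v)
    (i : Nat) (hi : i < v.length) : (v.getD i []).length = (grid.headD "").length := by
  have h1 : (v.map List.length).getD i 0 = (grid.headD "").length := by
    rw [hS, List.getD, List.getElem?_replicate]
    simp [shape_len grid v hS ▸ hi]
  rw [← h1, List.getD, List.getD, List.getElem?_map, List.getElem?_eq_getElem hi]
  simp

-- facts extracted from a false flood_fill guard plus the shape invariant
theorem blocked_false_facts (grid : List String) (v : List (List Bool)) (r c : Int)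
    (hS : Shape grid v) (hb : blocked grid v r c = false) :
    r.toNat < v.length ∧ c.toNat < (v.getD r.toNat []).length ∧
      (v.getD r.toNat []).getD c.toNat false = false := by
  simp only [blocked, Bool.or_eq_false_iff, decide_eq_false_iff_not, not_lt, not_le,
    beq_eq_false_iff_ne, ne_eq] at hb
  obtain ⟨⟨⟨⟨⟨hr0, hr1⟩, hc0⟩, hc1⟩, -⟩, hvg⟩ := hb
  have hvlen : v.length = grid.length := shape_len grid v hS
  have hr : r.toNat < v.length := by omega
  refine ⟨hr, ?_, ?_⟩
  · rw [shape_row_len grid v hS _ hr]; omega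
  · simpa [vget] using hvg

theorem Shape_vset (grid : List String) (v : List (List Bool)) (r c : Int)
    (hS : Shape grid v) : Shape grid (vset v r c) := by
  unfold Shape vset at *
  rw [setRow_map_length, hS]

-- (a) ff never increases unv and preserves the shape
theorem ff_unv_shape (grid : List String) :
    ∀ (fuel : Nat) (v : List (List Bool)) (r c : Int),
      unv (ff grid fuel v r c).2 ≤ unv v ∧
        (ff grid fuel v r c).2.map List.length = v.map List.length := by
  intro fuel
  induction fuel with
  | zero => intro v r c; simp [ff]
  | succ fuel ih =>
    intro v r c
    simp only [ff]
    cases hb : blocked grid v r c with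
    | true => simp
    | false =>
      simp only [Bool.false_eq_true, if_false]
      have h0 : unv (vset v r c) ≤ unv v := unv_setRow_le v r.toNat c.toNat
      have h0' : (vset v r c).map List.length = v.map List.length := setRow_map_length ..
      obtain ⟨h1, h1'⟩ := ih (vset v r c) (r+1) c
      obtain ⟨h2, h2'⟩ := ih (ff grid fuel (vset v r c) (r+1) c).2 (r-1) c
      obtain ⟨h3, h3'⟩ := ih (ff grid fuel (ff grid fuel (vset v r c) (r+1) c).2 (r-1) c).2 r (c+1)
      obtain ⟨h4, h4'⟩ := ih (ff grid fuel (ff grid fuel (ff grid fuel (vset v r c) (r+1) c).2 (r-1) c).2 r (c+1)).2 r (c-1)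
      constructor
      · omega
      · rw [h4', h3', h2', h1', h0']

theorem ff_shape (grid : List String) (fuel : Nat) (v : List (List Bool)) (r c : Int)
    (hS : Shape grid v) : Shape grid (ff grid fuel v r c).2 := by
  unfold Shape at *
  rw [(ff_unv_shape grid fuel v r c).2, hS]

-- fuel irrelevance for ff above the threshold unv v
theorem ff_irrel (grid : List String) :
    ∀ (f g : Nat) (v : List (List Bool)) (r c : Int), Shape grid v →
      unv v < f → unv v < g → ff grid f v r c = ff grid g v r c := by
  intro f
  induction f with
  | zero => intro g v r c _ hf; omega
  | succ f ih =>
    intro g v r c hS hf hg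
    obtain ⟨g', rfl⟩ : ∃ g', g = g' + 1 := ⟨g - 1, by omega⟩
    simp only [ff]
    cases hb : blocked grid v r c with
    | true => simp
    | false =>
      simp only [Bool.false_eq_true, if_false]
      obtain ⟨hr, hc, hvg⟩ := blocked_false_facts grid v r c hS hb
      have hdec : unv (vset v r c) + 1 = unv v := unv_setRow_eq v r.toNat c.toNat hr hc hvg
      have hS1 : Shape grid (vset v r c) := Shape_vset grid v r c hS
      have e1 : ff grid f (vset v r c) (r+1) c = ff grid g' (vset v r c) (r+1) c :=
        ih g' _ _ _ hS1 (by omega) (by omega)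
      rw [e1]
      have hS2 : Shape grid (ff grid g' (vset v r c) (r+1) c).2 := ff_shape _ _ _ _ _ hS1
      have hu2 : unv (ff grid g' (vset v r c) (r+1) c).2 ≤ unv (vset v r c) :=
        (ff_unv_shape grid g' _ _ _).1
      have e2 : ff grid f (ff grid g' (vset v r c) (r+1) c).2 (r-1) c
          = ff grid g' (ff grid g' (vset v r c) (r+1) c).2 (r-1) c :=
        ih g' _ _ _ hS2 (by omega) (by omega)
      rw [e2]
      have hS3 : Shape grid (ff grid g' (ff grid g' (vset v r c) (r+1) c).2 (r-1) c).2 :=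
        ff_shape _ _ _ _ _ hS2
      have hu3 : unv (ff grid g' (ff grid g' (vset v r c) (r+1) c).2 (r-1) c).2
          ≤ unv (ff grid g' (vset v r c) (r+1) c).2 := (ff_unv_shape grid g' _ _ _).1
      have e3 : ff grid f (ff grid g' (ff grid g' (vset v r c) (r+1) c).2 (r-1) c).2 r (c+1)
          = ff grid g' (ff grid g' (ff grid g' (vset v r c) (r+1) c).2 (r-1) c).2 r (c+1) :=
        ih g' _ _ _ hS3 (by omega) (by omega)
      rw [e3]
      have hS4 : Shape grid (ff grid g' (ff grid g' (ff grid g' (vset v r c) (r+1) c).2 (r-1) c).2 r (c+1)).2 :=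
        ff_shape _ _ _ _ _ hS3
      have hu4 : unv (ff grid g' (ff grid g' (ff grid g' (vset v r c) (r+1) c).2 (r-1) c).2 r (c+1)).2
          ≤ unv (ff grid g' (ff grid g' (vset v r c) (r+1) c).2 (r-1) c).2 :=
        (ff_unv_shape grid g' _ _ _).1
      have e4 : ff grid f (ff grid g' (ff grid g' (ff grid g' (vset v r c) (r+1) c).2 (r-1) c).2 r (c+1)).2 r (c-1)
          = ff grid g' (ff grid g' (ff grid g' (ff grid g' (vset v r c) (r+1) c).2 (r-1) c).2 r (c+1)).2 r (c-1) :=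
        ih g' _ _ _ hS4 (by omega) (by omega)
      rw [e4]

theorem ff_succ (grid : List String) (fuel : Nat) (v : List (List Bool)) (r c : Int) :
    ff grid (fuel+1) v r c =
      if blocked grid v r c then (0, v)
      else
        ((if gch grid r c = 'D' then (1 : Int) else 0)
            + (ff grid fuel (vset v r c) (r+1) c).1
            + (ff grid fuel (ff grid fuel (vset v r c) (r+1) c).2 (r-1) c).1
            + (ff grid fuel (ff grid fuel (ff grid fuel (vset v r c) (r+1) c).2 (r-1) c).2 r (c+1)).1
            + (ff grid fuel (ff grid fuel (ff grid fuel (ff grid fuel (vset v r c) (r+1) c).2 (r-1) c).2 r (c+1)).2 r (c-1)).1,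
          (ff grid fuel (ff grid fuel (ff grid fuel (ff grid fuel (vset v r c) (r+1) c).2 (r-1) c).2 r (c+1)).2 r (c-1)).2) := rfl

-- ===== pointwise lemmas about vset / the relation =====

theorem getD_setRow (v : List (List Bool)) (i j : Nat) :
    ∀ i', (setRow v i j).getD i' [] = if i' = i then (v.getD i []).set j true else v.getD i' [] := by
  induction v generalizing i with
  | nil =>
    intro i'
    simp only [setRow, List.getD]
    split <;> rfl
  | cons row rest ih =>
    intro i'
    cases i with
    | zero =>
      cases i' with
      | zero => simp [setRow]
      | succ k => simp [setRow, List.getD_cons_succ]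
    | succ s =>
      cases i' with
      | zero => simp [setRow]
      | succ k =>
        simp only [setRow, List.getD_cons_succ]
        rw [ih s k]
        simp

theorem getD_set_self {α : Type} (l : List α) (j : Nat) (a d : α) (hj : j < l.length) :
    (l.set j a).getD j d = a := by
  induction l generalizing j with
  | nil => simp at hj
  | cons b t ih =>
    cases j with
    | zero => simp
    | succ j =>
      simp only [List.length_cons, Nat.succ_lt_succ_iff] at hj
      simp only [List.set_cons_succ, List.getD_cons_succ]
      exact ih j hj

theorem getD_set_ne {α : Type} (l : List α) (j j' : Nat) (a d : α) (h : j ≠ j') :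
    (l.set j a).getD j' d = l.getD j' d := by
  induction l generalizing j j' with
  | nil => simp
  | cons b t ih =>
    cases j with
    | zero =>
      cases j' with
      | zero => omega
      | succ k => simp [List.getD_cons_succ]
    | succ j =>
      cases j' with
      | zero => simp
      | succ k =>
        simp only [List.set_cons_succ, List.getD_cons_succ]
        exact ih j k (by omega)

theorem vget_vset_self (v : List (List Bool)) (r c : Int)
    (hr : r.toNat < v.length) (hc : c.toNat < (v.getD r.toNat []).length) :
    vget (vset v r c) r c = true := by
  unfold vget vset
  rw [getD_setRow v r.toNat c.toNat r.toNat, if_pos rfl]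
  exact getD_set_self _ _ _ _ hc

theorem vget_vset_ne (v : List (List Bool)) (r c r' c' : Int)
    (h : r'.toNat ≠ r.toNat ∨ c'.toNat ≠ c.toNat) :
    vget (vset v r c) r' c' = vget v r' c' := by
  unfold vget vset
  rw [getD_setRow v r.toNat c.toNat r'.toNat]
  by_cases hr : r'.toNat = r.toNat
  · rw [if_pos hr, hr]
    rcases h with h | h
    · omega
    · exact getD_set_ne _ _ _ _ _ (fun he => h he.symm)
  · rw [if_neg hr]

-- the two guards agree under the relation
theorem guard_eq (grid : List String) (v : List (List Bool)) (S : List (Int × Int)) (r c : Int)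
    (hR : RelVS grid v S) : blocked grid v r c = skipB grid S r c := by
  rw [Bool.eq_iff_iff]
  simp only [blocked, skipB, Bool.or_eq_true, decide_eq_true_eq, beq_iff_eq,
    cellB_eq_gch, or_assoc]
  by_cases hin : 0 ≤ r ∧ r < (grid.length : Int) ∧ 0 ≤ c ∧ c < ((grid.headD "").length : Int)
  · obtain ⟨h1, h2, h3, h4⟩ := hin
    have hv := hR.2 r c h1 h2 h3 h4
    constructor
    · rintro (h | h | h | h | h | h)
      · omega
      · omega
      · omega
      · omega
      · exact Or.inr (Or.inl h)
      · exact Or.inr (Or.inr (hv.mp h))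
    · rintro (h | h | h)
      · exact absurd ⟨h1, h2, h3, h4⟩ h
      · exact Or.inr (Or.inr (Or.inr (Or.inr (Or.inl h))))
      · exact Or.inr (Or.inr (Or.inr (Or.inr (Or.inr (hv.mpr h)))))
  · have hb : r < 0 ∨ (grid.length : Int) ≤ r ∨ c < 0 ∨ ((grid.headD "").length : Int) ≤ c := by
      omega
    refine iff_of_true ?_ (Or.inl hin)
    rcases hb with h | h | h | h
    exacts [Or.inl h, Or.inr (Or.inl h), Or.inr (Or.inr (Or.inl h)),
      Or.inr (Or.inr (Or.inr (Or.inl h)))]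

-- facts extracted from a false worklist guard plus the relation
theorem skip_facts (grid : List String) (v : List (List Bool)) (S : List (Int × Int)) (r c : Int)
    (hR : RelVS grid v S) (hsk : skipB grid S r c = false) :
    (0 ≤ r ∧ r < (grid.length : Int) ∧ 0 ≤ c ∧ c < ((grid.headD "").length : Int)) ∧
      r.toNat < v.length ∧ c.toNat < (v.getD r.toNat []).length ∧
      vget v r c = false ∧ (r, c) ∉ S := by
  simp only [skipB, Bool.or_eq_false_iff, decide_eq_false_iff_not, not_not] at hsk
  obtain ⟨⟨hin, -⟩, hmem⟩ := hsk
  obtain ⟨h1, h2, h3, h4⟩ := hin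
  have hvlen : v.length = grid.length := shape_len grid v hR.1
  have hr : r.toNat < v.length := by omega
  have hc : c.toNat < (v.getD r.toNat []).length := by
    rw [shape_row_len grid v hR.1 _ hr]; omega
  have hvg : vget v r c = false := by
    cases hx : vget v r c with
    | false => rfl
    | true => exact absurd ((hR.2 r c h1 h2 h3 h4).mp hx) hmem
  exact ⟨⟨h1, h2, h3, h4⟩, hr, hc, hvg, hmem⟩

-- marking the same cell on both sides preserves the relation
theorem RelVS_step (grid : List String) (v : List (List Bool)) (S : List (Int × Int)) (r c : Int)
    (hR : RelVS grid v S) (h1 : 0 ≤ r) (h2 : r < (grid.length : Int)) (h3 : 0 ≤ c)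
    (h4 : c < ((grid.headD "").length : Int)) :
    RelVS grid (vset v r c) (PySem.Set.add S (r, c)) := by
  obtain ⟨hS, hiff⟩ := hR
  refine ⟨Shape_vset grid v r c hS, ?_⟩
  intro r' c' g1 g2 g3 g4
  have hvlen : v.length = grid.length := shape_len grid v hS
  have hr : r.toNat < v.length := by omega
  have hc : c.toNat < (v.getD r.toNat []).length := by
    rw [shape_row_len grid v hS _ hr]; omega
  by_cases he : r' = r ∧ c' = c
  · obtain ⟨rfl, rfl⟩ := he
    rw [vget_vset_self v r' c' hr hc]
    simp [PySem.Set.mem_add]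
  · have hne : r'.toNat ≠ r.toNat ∨ c'.toNat ≠ c.toNat := by
      rcases not_and_or.mp he with h | h
      · left; omega
      · right; omega
    rw [vget_vset_ne v r c r' c' hne, hiff r' c' g1 g2 g3 g4]
    have hpne : (r', c') ≠ (r, c) := by
      simp only [ne_eq, Prod.mk.injEq]
      exact he
    simp [PySem.Set.mem_add, hpne]

-- the initial states are related
theorem getD_rep {α : Type} (n : Nat) (a d : α) (i : Nat) :
    (List.replicate n a).getD i d = if i < n then a else d := by
  simp only [List.getD, List.getElem?_replicate]
  split <;> rfl

theorem RelVS_init (grid : List String) :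
    RelVS grid (List.replicate grid.length (List.replicate (grid.headD "").length false)) [] := by
  constructor
  · unfold Shape
    simp [List.map_replicate]
  · intro r c _ _ _ _
    constructor
    · intro h
      exfalso
      unfold vget at h
      rw [getD_rep] at h
      split at h
      · rw [getD_rep] at h
        split at h <;> simp at h
      · simp [List.getD] at h
    · intro h
      simp at h

-- equation lemmas for loopC
theorem loopC_cons (grid : List String) (fuel : Nat) (S : List (Int × Int)) (r c : Int)
    (td : List (Int × Int)) (cnt : Int) :
    loopC grid (fuel+1) S ((r, c) :: td) cnt =
      if skipB grid S r c then loopC grid fuel S td cnt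
      else loopC grid fuel (PySem.Set.add S (r, c))
        ((r+1, c) :: (r-1, c) :: (r, c+1) :: (r, c-1) :: td)
        (if cellB grid r c = 'D' then cnt + 1 else cnt) := rfl

theorem loopC_nil (grid : List String) (fuel : Nat) (S : List (Int × Int)) (cnt : Int) :
    loopC grid (fuel+1) S [] cnt = (cnt, S) := rfl

-- fuel irrelevance for loopC above the threshold 4*unv v + st.length (v related to S)
theorem loopC_irrel (grid : List String) :
    ∀ (f g : Nat) (v : List (List Bool)) (S st : List (Int × Int)) (cnt : Int), RelVS grid v S →
      4 * unv v + st.length < f → 4 * unv v + st.length < g →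
      loopC grid f S st cnt = loopC grid g S st cnt := by
  intro f
  induction f with
  | zero => intro g v S st cnt _ hf; omega
  | succ f ih =>
    intro g v S st cnt hR hf hg
    obtain ⟨g', rfl⟩ : ∃ g', g = g' + 1 := ⟨g - 1, by omega⟩
    cases st with
    | nil => simp [loopC_nil]
    | cons x st =>
      obtain ⟨r, c⟩ := x
      rw [loopC_cons, loopC_cons]
      cases hsk : skipB grid S r c with
      | true =>
        simp only [if_true]
        exact ih g' v S st cnt hR (by simp at hf ⊢; omega) (by simp at hg ⊢; omega)
      | false =>
        simp only [Bool.false_eq_true, if_false]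
        obtain ⟨⟨h1, h2, h3, h4⟩, hr, hc, hvg, -⟩ := skip_facts grid v S r c hR hsk
        have hdec : unv (vset v r c) + 1 = unv v := unv_setRow_eq v r.toNat c.toNat hr hc hvg
        have hR1 : RelVS grid (vset v r c) (PySem.Set.add S (r, c)) :=
          RelVS_step grid v S r c hR h1 h2 h3 h4
        exact ih g' _ _ _ _ hR1 (by simp at hf ⊢; omega) (by simp at hg ⊢; omega)

-- simulation, blocked case: one skipped pop consumes the cell and adds nothing
theorem sim_blocked (grid : List String) (v : List (List Bool)) (S : List (Int × Int))
    (r c : Int) (st : List (Int × Int)) (cnt : Int) (hR : RelVS grid v S)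
    (hb : blocked grid v r c = true) :
    ∃ S', RelVS grid (FF grid v r c).2 S' ∧
      loopC grid (4 * unv v + (st.length + 1) + 1) S ((r, c) :: st) cnt
        = loopC grid (4 * unv (FF grid v r c).2 + st.length + 1) S' st
            (cnt + (FF grid v r c).1) := by
  have hFF : FF grid v r c = (0, v) := by
    show ff grid (unv v + 1) v r c = (0, v)
    rw [ff_succ, if_pos hb]
  have hsk : skipB grid S r c = true := by rw [← guard_eq grid v S r c hR]; exact hb
  refine ⟨S, by rw [hFF]; exact hR, ?_⟩
  have hfu : 4 * unv v + (st.length + 1) + 1 = (4 * unv v + st.length + 1) + 1 := by omega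
  rw [hfu, loopC_cons, if_pos hsk, hFF]
  simp

-- the simulation: one pop of B's worklist behaves like one recursive flood_fill call
theorem sim (grid : List String) :
    ∀ (n : Nat) (v : List (List Bool)) (S : List (Int × Int)), unv v ≤ n → RelVS grid v S →
      ∀ (r c : Int) (st : List (Int × Int)) (cnt : Int),
        ∃ S', RelVS grid (FF grid v r c).2 S' ∧
          loopC grid (4 * unv v + (st.length + 1) + 1) S ((r, c) :: st) cnt
            = loopC grid (4 * unv (FF grid v r c).2 + st.length + 1) S' st
                (cnt + (FF grid v r c).1) := by
  intro n
  induction n with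
  | zero =>
    intro v S hn hR r c st cnt
    cases hb : blocked grid v r c with
    | true => exact sim_blocked grid v S r c st cnt hR hb
    | false =>
      obtain ⟨hr, hc, hvg⟩ := blocked_false_facts grid v r c hR.1 hb
      have := unv_setRow_eq v r.toNat c.toNat hr hc hvg
      omega
  | succ n ih =>
    intro v S hn hR r c st cnt
    cases hb : blocked grid v r c with
    | true => exact sim_blocked grid v S r c st cnt hR hb
    | false =>
      have hsk : skipB grid S r c = false := by rw [← guard_eq grid v S r c hR]; exact hb
      obtain ⟨⟨h1, h2, h3, h4⟩, hr, hc, hvg, -⟩ := skip_facts grid v S r c hR hsk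
      have hdec : unv (vset v r c) + 1 = unv v := unv_setRow_eq v r.toNat c.toNat hr hc hvg
      set v1 := vset v r c with hv1
      have hR1 : RelVS grid v1 (PySem.Set.add S (r, c)) := RelVS_step grid v S r c hR h1 h2 h3 h4
      set S1 := PySem.Set.add S (r, c) with hS1
      set cnt1 := if cellB grid r c = 'D' then cnt + 1 else cnt with hcnt1
      -- pop (r,c): mark it, push the four neighbours
      have hstep : loopC grid (4 * unv v + (st.length + 1) + 1) S ((r, c) :: st) cnt
          = loopC grid (4 * unv v1 + ((((r-1, c) :: (r, c+1) :: (r, c-1) :: st).length) + 1) + 1)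
              S1 ((r+1, c) :: (r-1, c) :: (r, c+1) :: (r, c-1) :: st) cnt1 := by
        have hfu : 4 * unv v + (st.length + 1) + 1 = (4 * unv v + st.length + 1) + 1 := by omega
        rw [hfu, loopC_cons, if_neg (by rw [hsk]; exact Bool.false_ne_true)]
        have hfu2 : 4 * unv v1 + ((((r-1, c) :: (r, c+1) :: (r, c-1) :: st).length) + 1) + 1
            = 4 * unv v + st.length + 1 := by simp; omega
        rw [hfu2]
      -- peel the four pushed neighbours with the induction hypothesis
      obtain ⟨S2, hR2, he1⟩ := ih v1 S1 (by omega) hR1 (r+1) c ((r-1, c) :: (r, c+1) :: (r, c-1) :: st) cnt1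
      set v2 := (FF grid v1 (r+1) c).2 with hv2
      have hu2 : unv v2 ≤ unv v1 := (ff_unv_shape grid _ _ _ _).1
      obtain ⟨S3, hR3, he2⟩ := ih v2 S2 (by omega) hR2 (r-1) c ((r, c+1) :: (r, c-1) :: st)
        (cnt1 + (FF grid v1 (r+1) c).1)
      set v3 := (FF grid v2 (r-1) c).2 with hv3
      have hu3 : unv v3 ≤ unv v2 := (ff_unv_shape grid _ _ _ _).1
      obtain ⟨S4, hR4, he3⟩ := ih v3 S3 (by omega) hR3 r (c+1) ((r, c-1) :: st)
        (cnt1 + (FF grid v1 (r+1) c).1 + (FF grid v2 (r-1) c).1)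
      set v4 := (FF grid v3 r (c+1)).2 with hv4
      have hu4 : unv v4 ≤ unv v3 := (ff_unv_shape grid _ _ _ _).1
      obtain ⟨S5, hR5, he4⟩ := ih v4 S4 (by omega) hR4 r (c-1) st
        (cnt1 + (FF grid v1 (r+1) c).1 + (FF grid v2 (r-1) c).1 + (FF grid v3 r (c+1)).1)
      set v5 := (FF grid v4 r (c-1)).2 with hv5
      -- identify FF at (r,c) with the chain of the four canonical calls
      have hFF : FF grid v r c
          = ((if gch grid r c = 'D' then (1 : Int) else 0)
                + (FF grid v1 (r+1) c).1 + (FF grid v2 (r-1) c).1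
                + (FF grid v3 r (c+1)).1 + (FF grid v4 r (c-1)).1, v5) := by
        show ff grid (unv v + 1) v r c = _
        have hfu : unv v + 1 = (unv v1 + 1) + 1 := by omega
        rw [hfu, ff_succ, if_neg (by rw [hb]; exact Bool.false_ne_true)]
        rw [← hv1]
        have e1 : ff grid (unv v1 + 1) v1 (r+1) c = FF grid v1 (r+1) c := rfl
        rw [e1, ← hv2]
        have e2 : ff grid (unv v1 + 1) v2 (r-1) c = FF grid v2 (r-1) c :=
          ff_irrel grid _ _ _ _ _ hR2.1 (by omega) (by omega)
        rw [e2, ← hv3]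
        have e3 : ff grid (unv v1 + 1) v3 r (c+1) = FF grid v3 r (c+1) :=
          ff_irrel grid _ _ _ _ _ hR3.1 (by omega) (by omega)
        rw [e3, ← hv4]
        have e4 : ff grid (unv v1 + 1) v4 r (c-1) = FF grid v4 r (c-1) :=
          ff_irrel grid _ _ _ _ _ hR4.1 (by omega) (by omega)
        rw [e4, ← hv5]
      refine ⟨S5, by rw [hFF]; exact hR5, ?_⟩
      rw [hstep, he1]
      have hfa : 4 * unv v2 + (((r-1, c) :: (r, c+1) :: (r, c-1) :: st).length) + 1
          = 4 * unv v2 + ((((r, c+1) :: (r, c-1) :: st).length) + 1) + 1 := by simp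
      rw [hfa, he2]
      have hfb : 4 * unv v3 + (((r, c+1) :: (r, c-1) :: st).length) + 1
          = 4 * unv v3 + ((((r, c-1) :: st).length) + 1) + 1 := by simp
      rw [hfb, he3]
      have hfc : 4 * unv v4 + (((r, c-1) :: st).length) + 1
          = 4 * unv v4 + (st.length + 1) + 1 := by simp
      rw [hfc, he4, hFF]
      congr 1
      rw [hcnt1, cellB_eq_gch]
      by_cases hD : gch grid r c = 'D' <;> simp [hD] <;> ring

-- a whole component: B's worklist run equals A's flood_fill call
theorem comp_eq (grid : List String) (v : List (List Bool)) (S : List (Int × Int)) (i j : Int)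
    (hR : RelVS grid v S) :
    ∃ S', RelVS grid (ff grid (grid.length * (grid.headD "").length + 1) v i j).2 S' ∧
      loopC grid (4 * grid.length * (grid.headD "").length + 2) S [(i, j)] 0
        = ((ff grid (grid.length * (grid.headD "").length + 1) v i j).1, S') := by
  have hle : unv v ≤ grid.length * (grid.headD "").length := unv_le_total grid v hR.1
  have hA : ff grid (grid.length * (grid.headD "").length + 1) v i j = FF grid v i j :=
    ff_irrel grid _ _ _ _ _ hR.1 (by omega) (by omega)
  have hB : loopC grid (4 * grid.length * (grid.headD "").length + 2) S [(i, j)] 0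
      = loopC grid (4 * unv v + (([] : List (Int × Int)).length + 1) + 1) S [(i, j)] 0 := by
    have h4 : 4 * grid.length * (grid.headD "").length
        = 4 * (grid.length * (grid.headD "").length) := by ring
    refine loopC_irrel grid _ _ v S [(i, j)] 0 hR ?_ ?_
    · simp only [List.length_cons, List.length_nil]
      omega
    · simp only [List.length_cons, List.length_nil]
      omega
  obtain ⟨S', hR', heq⟩ := sim grid (unv v) v S le_rfl hR i j [] 0
  refine ⟨S', by rw [hA]; exact hR', ?_⟩
  rw [hB, heq, loopC_nil, hA]
  simp

-- the per-cell bodies of the two double loops preserve the relation and the running max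
theorem cell_step (grid : List String) (sA : Int × List (List Bool))
    (sB : Int × List (Int × Int)) (i j : Int)
    (h1 : sA.1 = sB.1) (hR : RelVS grid sA.2 sB.2)
    (hi1 : 0 ≤ i) (hi2 : i < (grid.length : Int)) (hj1 : 0 ≤ j)
    (hj2 : j < ((grid.headD "").length : Int)) :
    (if gch grid i j = '.' ∧ vget sA.2 i j = false then
        let p := ff grid (grid.length * (grid.headD "").length + 1) sA.2 i j
        (max sA.1 p.1, p.2)
      else sA).1
      = (if cellB grid i j ≠ '.' ∨ (i, j) ∈ sB.2 then sB
         else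
           let p := loopC grid (4 * grid.length * (grid.headD "").length + 2) sB.2 [(i, j)] 0
           (max sB.1 p.1, p.2)).1
    ∧ RelVS grid
        (if gch grid i j = '.' ∧ vget sA.2 i j = false then
            let p := ff grid (grid.length * (grid.headD "").length + 1) sA.2 i j
            (max sA.1 p.1, p.2)
          else sA).2
        (if cellB grid i j ≠ '.' ∨ (i, j) ∈ sB.2 then sB
         else
           let p := loopC grid (4 * grid.length * (grid.headD "").length + 2) sB.2 [(i, j)] 0
           (max sB.1 p.1, p.2)).2 := by
  have hv := hR.2 i j hi1 hi2 hj1 hj2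
  by_cases hcA : gch grid i j = '.' ∧ vget sA.2 i j = false
  · have hcB : ¬ (cellB grid i j ≠ '.' ∨ (i, j) ∈ sB.2) := by
      rw [cellB_eq_gch]
      push_neg
      refine ⟨hcA.1, fun hm => ?_⟩
      rw [hv.mpr hm] at hcA
      exact Bool.noConfusion hcA.2
    rw [if_pos hcA, if_neg hcB]
    obtain ⟨S', hR', heq⟩ := comp_eq grid sA.2 sB.2 i j hR
    rw [heq, h1]
    exact ⟨rfl, hR'⟩
  · have hcB : cellB grid i j ≠ '.' ∨ (i, j) ∈ sB.2 := by
      rcases not_and_or.mp hcA with h | h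
      · left; rw [cellB_eq_gch]; exact h
      · right
        exact hv.mp (by cases hx : vget sA.2 i j with
          | true => rfl
          | false => exact absurd hx h)
    rw [if_neg hcA, if_pos hcB]
    exact ⟨h1, hR⟩

-- relational fold congruence
theorem foldl_rel {σ τ α : Type} (R : σ → τ → Prop) (f : σ → α → σ) (g : τ → α → τ) :
    ∀ (l : List α), (∀ s t a, a ∈ l → R s t → R (f s a) (g t a)) →
      ∀ s t, R s t → R (l.foldl f s) (l.foldl g t) := by
  intro l
  induction l with
  | nil => intro _ s t h; exact h
  | cons a l ih =>
    intro hf s t h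
    simp only [List.foldl_cons]
    exact ih (fun s t b hb => hf s t b (List.mem_cons_of_mem a hb)) _ _
      (hf s t a (List.mem_cons_self) h)

-- ===== VERDICT (by name: the statement is the Claim_ definition above) =====
theorem max_diamonds_spec : Claim_equal_max_diamonds := by
  intro grid _ _
  unfold Spec_max_diamonds max_diamonds max_diamonds_alt
  simp only
  have hmain := foldl_rel
    (fun (s : Int × List (List Bool)) (t : Int × List (Int × Int)) =>
      s.1 = t.1 ∧ RelVS grid s.2 t.2)
    (fun st i => (PySem.List.pyRange 0 (((grid.headD "").length : Int)) 1).foldl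
      (fun st j =>
        if gch grid i j = '.' ∧ vget st.2 i j = false then
          let p := ff grid (grid.length * (grid.headD "").length + 1) st.2 i j
          (max st.1 p.1, p.2)
        else st) st)
    (fun st i => (PySem.List.pyRange 0 (((grid.headD "").length : Int)) 1).foldl
      (fun st j =>
        if cellB grid i j ≠ '.' ∨ (i, j) ∈ st.2 then st
        else
          let p := loopC grid (4 * grid.length * (grid.headD "").length + 2) st.2 [(i, j)] 0
          (max st.1 p.1, p.2)) st)
    (PySem.List.pyRange 0 ((grid.length : Int)) 1)
    (fun s t i hi hst => by
      have hib := (PySem.List.mem_pyRange_one).mp hi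
      exact foldl_rel
        (fun (s : Int × List (List Bool)) (t : Int × List (Int × Int)) =>
          s.1 = t.1 ∧ RelVS grid s.2 t.2) _ _
        (PySem.List.pyRange 0 (((grid.headD "").length : Int)) 1)
        (fun s t j hj hst => by
          have hjb := (PySem.List.mem_pyRange_one).mp hj
          exact cell_step grid s t i j hst.1 hst.2 hib.1 hib.2 hjb.1 hjb.2)
        s t hst)
    ((0 : Int), List.replicate grid.length (List.replicate (grid.headD "").length false))
    ((0 : Int), ([] : List (Int × Int)))
    ⟨rfl, RelVS_init grid⟩
  exact hmain.1
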